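-- pv_equiv track=rewrite | github.com/HaillonSeant/Adventcode2023 | Adventcode2023/day13/sdffzqsesdfg.py | Recupcas
-- ===== SOURCE A (Python) =====
-- def Recupcas(lines):
-- 	li=[]
-- 	tmp=[]
-- 	lines.append([])
-- 	for i in range(len(lines)):
-- 		if len(lines[i])==0:
-- 			li.append(tmp)
-- 			tmp=[]
-- 		else:
-- 			tmp.append(lines[i])
-- 	return li
-- ===== SOURCE B (Python) =====
-- def Recupcas(lines):
--     lines.append([])
--     seps = [i for i, l in enumerate(lines) if len(l) == 0]
--     li = []
--     prev = -1
--     for e in seps: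
--         li.append(lines[prev + 1:e])
--         prev = e
--     return li
-- ===== Notes on version B (the rewrite author's own statement) =====
-- stated objective: alternative
-- what changed: Instead of one accumulating pass that grows a tmp group line by line, B first collects the indices of all empty lines (after the same sentinel append) and then emits each group as a slice between consecutive separator indices.
import Mathlib
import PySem

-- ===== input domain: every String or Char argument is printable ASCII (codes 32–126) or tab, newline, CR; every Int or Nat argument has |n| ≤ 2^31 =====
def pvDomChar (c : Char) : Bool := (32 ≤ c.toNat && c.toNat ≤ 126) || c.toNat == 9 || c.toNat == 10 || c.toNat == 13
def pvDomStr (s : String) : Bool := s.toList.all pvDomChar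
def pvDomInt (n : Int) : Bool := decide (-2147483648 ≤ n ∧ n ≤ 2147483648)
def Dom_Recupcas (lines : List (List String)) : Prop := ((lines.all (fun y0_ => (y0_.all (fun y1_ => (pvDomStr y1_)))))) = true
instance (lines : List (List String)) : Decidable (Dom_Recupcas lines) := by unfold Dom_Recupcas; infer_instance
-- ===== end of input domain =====

-- B differs only in algorithm; both mutate the Python argument (append of a sentinel empty line);
-- the equivalence proved here is about the RETURN value (both perform the same mutation).

-- ===== PORT A =====
-- loop body of A: on an empty line flush tmp into li, else append the line to tmp
def stepA (s : List (List (List String)) × List (List String)) (x : List String) :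
    List (List (List String)) × List (List String) :=
  if x.length == 0 then (s.1 ++ [s.2], []) else (s.1, s.2 ++ [x])

def Recupcas (lines : List (List String)) : List (List (List String)) :=
  let ls := lines ++ [[]]
  ((List.range ls.length).foldl (fun s i => stepA s (ls.getD i [])) ([], [])).1

-- ===== PORT B =====
-- loop body of B: append the slice between the previous separator and this one
def stepB (ls : List (List String)) (s : List (List (List String)) × Int) (e : Int) :
    List (List (List String)) × Int :=
  (s.1 ++ [PySem.List.slice ls (some (s.2 + 1)) (some e)], e)

def Recupcas_alt (lines : List (List String)) : List (List (List String)) :=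
  let ls := lines ++ [[]]
  let seps := ((PySem.List.enumerate ls).filter (fun p => p.2.length == 0)).map (·.1)
  (seps.foldl (stepB ls) ([], -1)).1

-- ===== PRECONDITION & SPEC =====
def Spec_Recupcas (lines : List (List String)) (out : List (List (List String))) : Prop := out = Recupcas_alt lines
instance (lines : List (List String)) (out : List (List (List String))) : Decidable (Spec_Recupcas lines out) := by unfold Spec_Recupcas; infer_instance

-- ===== CLAIM (what is proved, stated in full; the proofs are below) =====
def Claim_equal_Recupcas : Prop := ∀ (lines : List (List String)), Dom_Recupcas lines → Spec_Recupcas lines (Recupcas lines)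

-- ===== LEMMAS AND PROOFS =====

-- A's index loop is the element-wise fold of stepA over the list
theorem foldl_range'_getD (xs : List (List String)) :
    ∀ (ls : List (List String)) (s : Nat) (init : List (List (List String)) × List (List String)),
    ls.drop s = xs →
    (List.range' s xs.length 1).foldl (fun st i => stepA st (ls.getD i [])) init
      = xs.foldl stepA init := by
  induction xs with
  | nil => intro ls s init _; simp
  | cons x rest ih =>
      intro ls s init hdrop
      have hs : s < ls.length := by
        by_contra h
        have : ls.drop s = [] := List.drop_eq_nil_of_le (by omega)
        rw [hdrop] at this; exact absurd this (by simp)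
      have hx : ls.getD s [] = x := by
        have h0 : (ls.drop s)[0]? = ls[s + 0]? := List.getElem?_drop ..
        rw [hdrop] at h0
        simp only [List.getElem?_cons_zero, Nat.add_zero] at h0
        simp [List.getD, h0.symm]
      have hrest : ls.drop (s + 1) = rest := by
        have h := congrArg (List.drop 1) hdrop
        rw [List.drop_drop] at h
        simpa [Nat.add_comm] using h
      rw [List.length_cons, List.range'_succ, List.foldl_cons, hx,
        ih ls (s + 1) (stepA init x) hrest]
      simp

theorem foldl_range_getD (xs : List (List String)) (init : List (List (List String)) × List (List String)) :
    (List.range xs.length).foldl (fun s i => stepA s (xs.getD i [])) init = xs.foldl stepA init := by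
  rw [List.range_eq_range']
  exact foldl_range'_getD xs xs 0 init (by simp)

-- the invariant tying A's tmp accumulator to B's slice between separators
theorem main_inv (xs : List (List String)) :
    ∀ (ls : List (List String)) (k p : Nat) (li : List (List (List String))),
    ls.drop k = xs → p ≤ k →
    (xs.foldl stepA (li, (ls.drop p).take (k - p))).1
      = ((((PySem.List.enumerate xs (k : Int)).filter (fun q => q.2.length == 0)).map (·.1)).foldl
          (stepB ls) (li, (p : Int) - 1)).1 := by
  induction xs with
  | nil => intro ls k p li _ _; simp [PySem.List.enumerate_nil]
  | cons x rest ih =>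
      intro ls k p li hdrop hpk
      have hk : k < ls.length := by
        by_contra h
        have : ls.drop k = [] := List.drop_eq_nil_of_le (by omega)
        rw [hdrop] at this; exact absurd this (by simp)
      have hx : ls[k] = x := by
        have h0 : (ls.drop k)[0]? = ls[k + 0]? := List.getElem?_drop ..
        rw [hdrop] at h0
        simp only [List.getElem?_cons_zero, Nat.add_zero,
          List.getElem?_eq_getElem hk] at h0
        exact (Option.some.injEq .. ▸ h0).symm
      have hrest : ls.drop (k + 1) = rest := by
        have h := congrArg (List.drop 1) hdrop
        rw [List.drop_drop] at h
        simpa [Nat.add_comm] using h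
      rw [PySem.List.enumerate_cons]
      by_cases hempty : x.length = 0
      · -- separator: A flushes tmp, B appends the slice ls[p:k]
        have hslice : PySem.List.slice ls (some ((p : Int) - 1 + 1)) (some (k : Int))
            = (ls.drop p).take (k - p) := by
          rw [show (p : Int) - 1 + 1 = (p : Int) by ring, PySem.List.slice_natCast]
        have hb : (x.length == 0) = true := by simpa using hempty
        simp only [List.foldl_cons, stepA, List.filter_cons, hb, if_true,
          List.map_cons, stepB, hslice]
        have := ih ls (k + 1) (k + 1) (li ++ [(ls.drop p).take (k - p)]) hrest (le_refl _)
        simp only [Nat.sub_self, List.take_zero] at this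
        rw [show ((k : Int) + 1 : Int) = ((k + 1 : Nat) : Int) by push_cast; ring] at *
        rw [show (k : Int) = ((k + 1 : Nat) : Int) - 1 by push_cast; ring]
        exact this
      · -- non-separator: tmp grows by ls[k], B's separator list is unchanged
        have hbe : (x.length == 0) = false := by simpa using hempty
        simp only [List.foldl_cons, stepA, Bool.false_eq_true, if_false,
          List.filter_cons, hbe]
        have htake : (ls.drop p).take (k - p) ++ [x] = (ls.drop p).take (k + 1 - p) := by
          rw [show k + 1 - p = (k - p) + 1 by omega, List.take_add_one]
          have h0 : (ls.drop p)[k - p]? = some x := by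
            rw [List.getElem?_drop, show p + (k - p) = k by omega,
              List.getElem?_eq_getElem hk, hx]
          simp [h0]
        rw [htake]
        have := ih ls (k + 1) p li hrest (by omega)
        rw [show ((k : Int) + 1 : Int) = ((k + 1 : Nat) : Int) by push_cast; ring]
        exact this

theorem Recupcas_spec : Claim_equal_Recupcas := by
  intro lines _
  unfold Spec_Recupcas Recupcas Recupcas_alt
  simp only []
  rw [foldl_range_getD]
  have := main_inv (lines ++ [[]]) (lines ++ [[]]) 0 0 [] (by simp) (le_refl 0)
  simpa using this
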